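-- pv_equiv track=rewrite | github.com/andrewwhwang/AoC2019 | dec4.py | containsRepeat
-- ===== SOURCE A (Python) =====
-- def containsRepeat(num):
--     record = {'0':0, '1':0, '2':0, '3':0, '4':0, '5':0, '6':0, '7':0, '8':0, '9':0}
--
--     # record number of adj pairs
--     numstr = str(num)
--     for i in range(1,len(numstr)):
--         if numstr[i] == numstr[i-1]:
--             record[numstr[i]] += 1
--
--     # if true if at least one adj pair exists
--     recordList = [i == 1 for i in record.values()]
--     return any(recordList)
-- ===== SOURCE B (Python) =====
-- def containsRepeat(num):
--     counts = {}
--     s = str(num)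
--     while s:
--         c = s[0]
--         k = 1
--         while k < len(s) and s[k] == c:
--             k += 1
--         counts[c] = counts.get(c, 0) + (k - 1)
--         s = s[k:]
--     return any(v == 1 for v in counts.values())
-- ===== Notes on version B (the rewrite author's own statement) =====
-- stated objective: alternative
-- what changed: Replaces A's per-index adjacent-comparison loop over a fixed ten-digit dict by a run-length scan: the string is consumed run of equal characters by run, each run adding its length minus one to a dynamically built dict, then any(v == 1).
import Mathlib
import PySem

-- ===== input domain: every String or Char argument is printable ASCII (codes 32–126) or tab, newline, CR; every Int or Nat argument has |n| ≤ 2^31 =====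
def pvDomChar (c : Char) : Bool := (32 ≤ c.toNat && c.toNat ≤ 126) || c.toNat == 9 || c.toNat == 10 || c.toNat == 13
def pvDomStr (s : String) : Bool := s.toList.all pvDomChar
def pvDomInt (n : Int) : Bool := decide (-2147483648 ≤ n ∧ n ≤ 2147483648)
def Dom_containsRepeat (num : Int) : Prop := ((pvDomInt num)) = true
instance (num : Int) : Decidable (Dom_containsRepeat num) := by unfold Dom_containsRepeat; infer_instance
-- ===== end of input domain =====

-- B consumes the string run of equal characters by run (run-length scan), adding run length - 1
-- per character into a dynamically built dict, instead of A's per-index comparison into a fixed ten-digit dict.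


-- ===== PORT A =====
def containsRepeat (num : Int) : Bool :=
  let record : PySem.Dict Char Int :=
    PySem.Dict.ofList [('0',0),('1',0),('2',0),('3',0),('4',0),('5',0),('6',0),('7',0),('8',0),('9',0)]
  let numstr := PySem.Int.toStr num
  let l := numstr.toList
  let record := (PySem.List.pyRange 1 (PySem.Str.len numstr) 1).foldl
    (fun r i =>
      if PySem.List.pyGetD l i ' ' == PySem.List.pyGetD l (i-1) ' '
      then r.modify (PySem.List.pyGetD l i ' ') 0 (· + 1) else r) record
  let recordList := record.values.map (fun v => v == (1 : Int))
  recordList.any id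

-- ===== PORT B =====
-- Source B's outer while loop: take the maximal run of the first character (the inner while
-- counts k = 1 + length of the equal prefix of the tail), tally k - 1, continue on the rest.
def pvRunLoop : List Char → PySem.Dict Char Int → PySem.Dict Char Int
  | [], counts => counts
  | c :: rest, counts =>
    pvRunLoop (rest.dropWhile (· == c))
      (counts.insert c (counts.getD c 0 + ((rest.takeWhile (· == c)).length : Int)))
  termination_by l _ => l.length
  decreasing_by
    simp only [List.length_cons, Nat.lt_succ_iff]
    exact List.length_dropWhile_le _ _

def containsRepeat_alt (num : Int) : Bool :=
  let counts := pvRunLoop (PySem.Int.toStr num).toList PySem.Dict.empty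
  counts.values.any (fun v => v == (1 : Int))

-- ===== PRECONDITION & SPEC =====
def Spec_containsRepeat (num : Int) (out : Bool) : Prop := out = containsRepeat_alt num
instance (num : Int) (out : Bool) : Decidable (Spec_containsRepeat num out) := by unfold Spec_containsRepeat; infer_instance

-- ===== CLAIM (what is proved, stated in full; the proofs are below) =====
def Claim_equal_containsRepeat : Prop := ∀ (num : Int), Dom_containsRepeat num → Spec_containsRepeat num (containsRepeat num)

-- ===== LEMMAS AND PROOFS =====

-- the adjacent-pair characters of a list (proof-side characterisation shared by both ports)
def pvReps (l : List Char) : List Char :=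
  ((l.zip l.tail).filter (fun p => p.2 == p.1)).map (·.2)

def pvDigits : List Char := ['0','1','2','3','4','5','6','7','8','9']

def pvD0 : PySem.Dict Char Int :=
  PySem.Dict.ofList [('0',0),('1',0),('2',0),('3',0),('4',0),('5',0),('6',0),('7',0),('8',0),('9',0)]

lemma pv_isDigit_mem (c : Char) (h : c.isDigit = true) : c ∈ pvDigits := by
  have h1 : 48 ≤ c.val.toNat ∧ c.val.toNat ≤ 57 := by
    simpa [Char.isDigit, Char.le_def, UInt32.le_iff_toNat_le] using h
  simp only [pvDigits, List.mem_cons, List.not_mem_nil, or_false, Char.ext_iff,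
    ← UInt32.toNat_inj]
  have e0 : ('0').val.toNat = 48 := rfl
  have e1 : ('1').val.toNat = 49 := rfl
  have e2 : ('2').val.toNat = 50 := rfl
  have e3 : ('3').val.toNat = 51 := rfl
  have e4 : ('4').val.toNat = 52 := rfl
  have e5 : ('5').val.toNat = 53 := rfl
  have e6 : ('6').val.toNat = 54 := rfl
  have e7 : ('7').val.toNat = 55 := rfl
  have e8 : ('8').val.toNat = 56 := rfl
  have e9 : ('9').val.toNat = 57 := rfl
  rw [e0, e1, e2, e3, e4, e5, e6, e7, e8, e9]
  omega

lemma pv_tail_digits (num : Int) (c : Char) (h : c ∈ (PySem.Int.toChars num).tail) :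
    c ∈ pvDigits := by
  apply pv_isDigit_mem
  unfold PySem.Int.toChars at h
  split at h
  · exact Nat.isDigit_of_mem_toDigits (b := 10) (by norm_num) (by norm_num) (by simpa using h)
  · exact Nat.isDigit_of_mem_toDigits (b := 10) (by norm_num) (by norm_num) (List.mem_of_mem_tail h)

lemma pv_rangeFold {σ : Type} (g : σ → Char → Char → σ) :
    ∀ (x : Char) (xs : List Char) (d : σ),
      (List.range xs.length).foldl
        (fun r k => g r ((x::xs).getD k ' ') ((x::xs).getD (k+1) ' ')) d
      = ((x::xs).zip xs).foldl (fun r p => g r p.1 p.2) d := by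
  intro x xs
  induction xs generalizing x with
  | nil => intro d; simp
  | cons y ys ih =>
    intro d
    rw [List.length_cons, List.range_succ_eq_map]
    simp only [List.foldl_cons, List.foldl_map, List.getD_cons_zero, List.getD_cons_succ,
      List.zip_cons_cons]
    exact ih y (g d x y)

lemma pv_foldl_if_filter (ps : List (Char × Char)) :
    ∀ d : PySem.Dict Char Int,
      ps.foldl (fun r p => if p.2 == p.1 then r.modify p.2 0 (· + 1) else r) d
      = ((ps.filter (fun p => p.2 == p.1)).map (·.2)).foldl
          (fun r x => r.modify x 0 (· + 1)) d := by
  induction ps with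
  | nil => intro d; simp
  | cons p ps ih =>
    intro d
    simp only [List.foldl_cons, List.filter_cons]
    by_cases h : (p.2 == p.1) = true
    · rw [if_pos h, if_pos h]; simp only [List.map_cons, List.foldl_cons]; exact ih _
    · rw [if_neg h, if_neg h]; exact ih d

-- A's index loop over positions 1..len-1 equals the filtered-adjacent-pair tally
lemma pv_A_loop (x : Char) (xs : List Char) (d : PySem.Dict Char Int) :
    (PySem.List.pyRange 1 (((x::xs).length : Int)) 1).foldl
      (fun r i => if PySem.List.pyGetD (x::xs) i ' ' == PySem.List.pyGetD (x::xs) (i-1) ' '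
        then r.modify (PySem.List.pyGetD (x::xs) i ' ') 0 (· + 1) else r) d
    = (pvReps (x::xs)).foldl (fun r c => r.modify c 0 (· + 1)) d := by
  rw [PySem.List.pyRange_one]
  have h1 : ((((x::xs).length : Int)) - 1).toNat = xs.length := by simp
  rw [h1, List.foldl_map]
  have hfun : (fun (r : PySem.Dict Char Int) (k : ℕ) =>
      if PySem.List.pyGetD (x::xs) (1 + (k:Int)) ' ' == PySem.List.pyGetD (x::xs) (1 + (k:Int) - 1) ' '
      then r.modify (PySem.List.pyGetD (x::xs) (1 + (k:Int)) ' ') 0 (· + 1) else r)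
      = (fun r k =>
        (fun (r : PySem.Dict Char Int) (a b : Char) => if b == a then r.modify b 0 (· + 1) else r)
          r ((x::xs).getD k ' ') ((x::xs).getD (k+1) ' ')) := by
    funext r k
    have e1 : (1 + (k:Int)) = ((k+1 : ℕ) : Int) := by omega
    have e2 : (1 + (k:Int) - 1) = ((k : ℕ) : Int) := by omega
    rw [e2, e1, PySem.List.pyGetD_natCast, PySem.List.pyGetD_natCast]
  rw [hfun]
  exact (pv_rangeFold (fun r a b => if b == a then r.modify b 0 (· + 1) else r) x xs d).trans
    (pv_foldl_if_filter _ d)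

lemma pv_getD0 (k : Char) (hk : k ∈ pvDigits) : pvD0.getD k 0 = 0 := by
  fin_cases hk <;> decide

-- A's tallied dict read out over the ten digit keys agrees with the exact-count ∃-form
lemma pv_final (reps2 : List Char) (hsub : ∀ c ∈ reps2, c ∈ pvDigits) :
    ((reps2.foldl (fun r c => r.modify c 0 (· + 1)) pvD0).values.map
        (fun v => v == (1 : Int))).any id
    = reps2.any (fun c => reps2.count c == 1) := by
  have hkeys : (reps2.foldl (fun r c => r.modify c 0 (· + 1)) pvD0).keys = pvDigits := by
    refine (PySem.Dict.keys_foldl_modify reps2 (0:Int) (fun _ _ => (· + 1)) pvD0).trans ?_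
    have hk0 : pvD0.keys = pvDigits := by decide
    rw [hk0, PySem.Set.update_eq_append_filter]
    have hnil : List.filter (fun y => !(PySem.Set.contains pvDigits y)) (PySem.Set.ofList reps2) = [] := by
      apply List.filter_eq_nil_iff.mpr
      intro y hy
      have hy' : y ∈ reps2 := (PySem.Set.mem_ofList reps2 y).mp hy
      simp [PySem.Set.contains, hsub y hy']
    rw [hnil, List.append_nil]
  have hnd : (reps2.foldl (fun r c => r.modify c 0 (· + 1)) pvD0).keys.Nodup := by
    rw [hkeys]; decide
  have hv := PySem.Dict.values_eq_map_keys _ hnd 0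
  rw [hkeys] at hv
  rw [hv]
  have hg : ∀ k, (reps2.foldl (fun r c => r.modify c 0 (· + 1)) pvD0).getD k 0
      = pvD0.getD k 0 + List.count k reps2 :=
    fun k => PySem.Dict.getD_foldl_modify_add_one reps2 pvD0 k
  rw [Bool.eq_iff_iff]
  simp only [List.map_map, List.any_map, List.any_eq_true, Function.comp, id_eq, hg,
    beq_iff_eq]
  constructor
  · rintro ⟨k, hk, h1⟩
    rw [pv_getD0 k hk, zero_add] at h1
    have hcnt : List.count k reps2 = 1 := by exact_mod_cast h1
    exact ⟨k, List.count_pos_iff.mp (by omega), hcnt⟩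
  · rintro ⟨c, hc, h1⟩
    refine ⟨c, hsub c hc, ?_⟩
    rw [pv_getD0 c (hsub c hc), zero_add]
    exact_mod_cast h1

-- pvReps splits at the leading run
lemma pv_reps_cons (rest : List Char) : ∀ c : Char,
    pvReps (c :: rest)
      = List.replicate (rest.takeWhile (· == c)).length c ++ pvReps (rest.dropWhile (· == c)) := by
  induction rest with
  | nil => intro c; simp [pvReps]
  | cons y t ih =>
    intro c
    by_cases h : y = c
    · subst h
      have hstep : pvReps (y :: y :: t) = y :: pvReps (y :: t) := by
        simp [pvReps]
      rw [hstep, ih y]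
      simp [List.takeWhile, List.dropWhile, List.replicate_succ]
    · have hstep : pvReps (c :: y :: t) = pvReps (y :: t) := by
        simp [pvReps, h]
      rw [hstep, List.takeWhile_cons_of_neg (by simp [h]),
        List.dropWhile_cons_of_neg (by simp [h])]
      simp

-- the run loop's count for each key
lemma pv_runLoop_getD (l : List Char) (d : PySem.Dict Char Int) :
    ∀ (k : Char), (pvRunLoop l d).getD k 0 = d.getD k 0 + ((pvReps l).count k : Int) := by
  induction l, d using pvRunLoop.induct with
  | case1 d => intro k; simp [pvRunLoop, pvReps]
  | case2 c rest d ih =>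
    intro k
    rw [pvRunLoop, ih, pv_reps_cons, List.count_append, PySem.Dict.getD_insert]
    by_cases hk : k = c
    · subst hk
      simp only [List.count_replicate_self]
      push_cast
      ring
    · rw [if_neg hk]
      have h0 : List.count k (List.replicate (List.takeWhile (fun x => x == c) rest).length c) = 0 := by
        rw [List.count_replicate, if_neg (by simp [beq_iff_eq]; exact fun h => hk h.symm)]
      rw [h0]
      push_cast
      ring

-- the run loop's keys
lemma pv_runLoop_mem_keys (l : List Char) (d : PySem.Dict Char Int) :
    ∀ (k : Char), k ∈ (pvRunLoop l d).keys ↔ (k ∈ d.keys ∨ k ∈ l) := by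
  induction l, d using pvRunLoop.induct with
  | case1 d => intro k; simp [pvRunLoop]
  | case2 c rest d ih =>
    intro k
    rw [pvRunLoop, ih, PySem.Dict.mem_keys_insert]
    constructor
    · rintro (⟨rfl | hd⟩ | hrest)
      · exact Or.inr (List.mem_cons_self)
      · exact Or.inl hd
      · exact Or.inr (List.mem_cons_of_mem _ ((List.dropWhile_sublist _).mem hrest))
    · rintro (hd | hc)
      · exact Or.inl (Or.inr hd)
      · rcases List.mem_cons.mp hc with rfl | hrest
        · exact Or.inl (Or.inl rfl)
        · rw [← List.takeWhile_append_dropWhile (p := (· == c)) (l := rest)] at hrest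
          rcases List.mem_append.mp hrest with htw | hdw
          · exact Or.inl (Or.inl (by simpa using List.mem_takeWhile_imp htw))
          · exact Or.inr hdw

lemma pv_runLoop_nodup (l : List Char) (d : PySem.Dict Char Int) :
    d.keys.Nodup → (pvRunLoop l d).keys.Nodup := by
  induction l, d using pvRunLoop.induct with
  | case1 d => intro h; simpa [pvRunLoop] using h
  | case2 c rest d ih =>
    intro h
    rw [pvRunLoop]
    exact ih (PySem.Dict.nodup_keys_insert _ _ _ h)

-- B's final read-out agrees with the exact-count ∃-form
lemma pv_B_final (l : List Char) :
    ((pvRunLoop l PySem.Dict.empty).values.any (fun v => v == (1 : Int)))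
    = (pvReps l).any (fun c => (pvReps l).count c == 1) := by
  have hnd : (pvRunLoop l PySem.Dict.empty).keys.Nodup :=
    pv_runLoop_nodup l _ PySem.Dict.nodup_keys_empty
  rw [PySem.Dict.values_eq_map_keys _ hnd 0, Bool.eq_iff_iff]
  simp only [List.any_map, List.any_eq_true, Function.comp, pv_runLoop_getD,
    PySem.Dict.getD_empty, zero_add, beq_iff_eq, pv_runLoop_mem_keys,
    PySem.Dict.keys_empty, List.not_mem_nil, false_or]
  constructor
  · rintro ⟨k, hk, h1⟩
    have hcnt : (pvReps l).count k = 1 := by exact_mod_cast h1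
    exact ⟨k, List.count_pos_iff.mp (by omega), hcnt⟩
  · rintro ⟨c, hc, h1⟩
    have hcl : c ∈ l := by
      obtain ⟨p, hp, rfl⟩ := List.mem_map.mp hc
      have hz := (List.mem_filter.mp hp).1
      exact List.mem_of_mem_tail (List.of_mem_zip hz).2
    exact ⟨c, hcl, by exact_mod_cast h1⟩

-- ===== VERDICT (by name: the statement is the Claim_ definition above) =====
set_option maxRecDepth 100000 in
theorem containsRepeat_spec : Claim_equal_containsRepeat := by
  intro num _h
  unfold Spec_containsRepeat containsRepeat containsRepeat_alt
  simp only [PySem.Str.len, PySem.Int.toList_toStr]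
  rw [pv_B_final]
  cases hl : PySem.Int.toChars num with
  | nil =>
    rw [PySem.List.pyRange_one]
    simp only [pvReps, List.zip_nil_left, List.filter_nil, List.map_nil]
    decide
  | cons x xs =>
    rw [pv_A_loop]
    have hsub : ∀ c ∈ pvReps (x::xs), c ∈ pvDigits := by
      intro c hc
      obtain ⟨p, hp, rfl⟩ := List.mem_map.mp hc
      have hz := (List.mem_filter.mp hp).1
      have h2 : p.2 ∈ xs := (List.of_mem_zip (a := p.1) (b := p.2) (by simpa [pvReps] using hz)).2
      exact pv_tail_digits num p.2 (by rw [hl]; simpa using h2)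
    exact pv_final _ hsub
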